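-- pv_equiv track=rewrite | github.com/MitraLab-Organization/bap-ontology-editor | scripts/generate_tree.py | generate_mermaid_blood_supply
-- ===== SOURCE A (Python) =====
-- from typing import Dict, List, Optional
-- from collections import defaultdict
--
-- def get_structure_name(structures: Dict[str, dict], id_or_name: str) -> str:
--     """Get structure name from ID or return as-is if already a name."""
--     if id_or_name in structures:
--         return structures[id_or_name].get('name', id_or_name)
--     return id_or_name
--
-- def generate_mermaid_blood_supply(structures: Dict[str, dict], relationships: Dict[str, List[dict]]) -> str:
--     """Generate Mermaid diagram for blood supply relationships."""
--     blood_supply = relationships.get('supplied_by', [])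
--
--     if not blood_supply:
--         return ""
--
--     # Group by artery
--     by_artery = defaultdict(list)
--     for rel in blood_supply:
--         artery = get_structure_name(structures, rel.get('object', ''))
--         structure = get_structure_name(structures, rel.get('subject', ''))
--         by_artery[artery].append(structure)
--
--     lines = [
--         "```mermaid",
--         "graph LR",
--     ]
--
--     for artery, supplied in sorted(by_artery.items()):
--         artery_id = artery.replace(' ', '_').replace('-', '_')
--         lines.append(f"    {artery_id}([{artery}])")
--
--         for struct in sorted(supplied)[:6]:
--             struct_id = struct.replace(' ', '_').replace('-', '_')
--             lines.append(f"    {artery_id} -.->|supplies| {struct_id}[{struct}]")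
--
--     lines.append("```")
--     return '\n'.join(lines)
-- ===== SOURCE B (Python) =====
-- def _resolve(structures, id_or_name):
--     if id_or_name in structures:
--         return structures[id_or_name].get('name', id_or_name)
--     return id_or_name
--
-- def generate_mermaid_blood_supply(structures, relationships):
--     """Flatten to (artery, structure) pairs, sort once, emit in a single linear pass."""
--     blood_supply = relationships.get('supplied_by', [])
--     if not blood_supply:
--         return ""
--     pairs = sorted((_resolve(structures, rel.get('object', '')),
--                     _resolve(structures, rel.get('subject', '')))
--                    for rel in blood_supply)
--     lines = ["```mermaid", "graph LR"]
--     current = None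
--     count = 0
--     for artery, struct in pairs:
--         if artery != current:
--             current = artery
--             count = 0
--             artery_id = artery.replace(' ', '_').replace('-', '_')
--             lines.append(f"    {artery_id}([{artery}])")
--         if count < 6:
--             artery_id = artery.replace(' ', '_').replace('-', '_')
--             struct_id = struct.replace(' ', '_').replace('-', '_')
--             lines.append(f"    {artery_id} -.->|supplies| {struct_id}[{struct}]")
--             count += 1
--     lines.append("```")
--     return '\n'.join(lines)
-- ===== Notes on version B (the rewrite author's own statement) =====
-- stated objective: alternative
-- what changed: B flattens the relationships into (artery, structure) pairs, sorts that flat list once lexicographically, and emits the diagram in a single linear pass with a current-artery marker and a per-artery counter, instead of A's defaultdict grouping followed by sorting the dict items and each group separately.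
import Mathlib
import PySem

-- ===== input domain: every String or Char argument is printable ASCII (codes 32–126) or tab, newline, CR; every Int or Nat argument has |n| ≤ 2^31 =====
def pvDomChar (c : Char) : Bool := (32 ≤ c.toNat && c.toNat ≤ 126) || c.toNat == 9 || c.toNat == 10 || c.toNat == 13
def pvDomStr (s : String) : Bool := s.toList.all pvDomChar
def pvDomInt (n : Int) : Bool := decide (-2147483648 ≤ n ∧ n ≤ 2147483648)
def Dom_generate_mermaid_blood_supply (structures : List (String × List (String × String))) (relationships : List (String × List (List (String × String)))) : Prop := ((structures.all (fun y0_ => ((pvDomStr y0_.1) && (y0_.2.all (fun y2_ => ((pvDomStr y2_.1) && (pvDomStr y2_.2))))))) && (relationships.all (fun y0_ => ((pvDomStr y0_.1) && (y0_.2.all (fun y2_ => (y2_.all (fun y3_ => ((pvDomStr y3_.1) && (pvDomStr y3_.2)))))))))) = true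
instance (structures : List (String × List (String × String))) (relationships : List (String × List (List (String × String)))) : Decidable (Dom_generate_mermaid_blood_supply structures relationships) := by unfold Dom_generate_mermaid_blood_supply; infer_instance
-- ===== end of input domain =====

-- B re-implements A by flattening to (artery, structure) pairs, sorting once and emitting in a single
-- linear pass with a per-artery counter, instead of A's dict grouping with a per-group sort (objective: alternative).

-- ===== PORT A =====
def get_structure_name (structures : List (String × List (String × String))) (id_or_name : String) : String :=
  match (PySem.Dict.mk structures).get? id_or_name with
  | some d => (PySem.Dict.mk d).getD "name" id_or_name
  | none => id_or_name

def generate_mermaid_blood_supply (structures : List (String × List (String × String))) (relationships : List (String × List (List (String × String)))) : String :=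
  let blood_supply := (PySem.Dict.mk relationships).getD "supplied_by" []
  if blood_supply = [] then "" else
    let by_artery := blood_supply.foldl (fun d rel =>
        let artery := get_structure_name structures ((PySem.Dict.mk rel).getD "object" "")
        let structure_ := get_structure_name structures ((PySem.Dict.mk rel).getD "subject" "")
        d.modify artery [] (fun l => l ++ [structure_])) (PySem.Dict.mk [])
    let lines0 : List String := ["```mermaid", "graph LR"]
    let lines1 := (PySem.List.sorted by_artery.items (fun kv => kv.1)).foldl (fun lines kv =>
        let artery := kv.1
        let artery_id := PySem.Str.replace (PySem.Str.replace artery " " "_") "-" "_"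
        let lines := lines ++ ["    " ++ artery_id ++ "([" ++ artery ++ "])"]
        (PySem.List.slice (PySem.List.sorted kv.2 (fun x => x)) none (some 6)).foldl (fun lines structure_ =>
            let struct_id := PySem.Str.replace (PySem.Str.replace structure_ " " "_") "-" "_"
            lines ++ ["    " ++ artery_id ++ " -.->|supplies| " ++ struct_id ++ "[" ++ structure_ ++ "]"]) lines) lines0
    PySem.Str.join "\n" (lines1 ++ ["```"])

-- ===== PORT B =====
def resolve_name (structures : List (String × List (String × String))) (id_or_name : String) : String :=
  match (PySem.Dict.mk structures).get? id_or_name with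
  | some d => (PySem.Dict.mk d).getD "name" id_or_name
  | none => id_or_name

def pvStepB (st : Option String × Int × List String) (p : String × String) : Option String × Int × List String :=
  let artery := p.1
  let structure_ := p.2
  let st1 := if some artery ≠ st.1 then
      (some artery, (0 : Int),
        st.2.2 ++ ["    " ++ PySem.Str.replace (PySem.Str.replace artery " " "_") "-" "_" ++ "([" ++ artery ++ "])"])
    else st
  if st1.2.1 < 6 then
    (st1.1, st1.2.1 + 1,
      st1.2.2 ++ ["    " ++ PySem.Str.replace (PySem.Str.replace artery " " "_") "-" "_" ++ " -.->|supplies| "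
        ++ PySem.Str.replace (PySem.Str.replace structure_ " " "_") "-" "_" ++ "[" ++ structure_ ++ "]"])
  else st1

def generate_mermaid_blood_supply_alt (structures : List (String × List (String × String))) (relationships : List (String × List (List (String × String)))) : String :=
  let blood_supply := (PySem.Dict.mk relationships).getD "supplied_by" []
  if blood_supply = [] then "" else
    let pairs := PySem.List.sorted2 (blood_supply.map (fun rel =>
        (resolve_name structures ((PySem.Dict.mk rel).getD "object" ""),
         resolve_name structures ((PySem.Dict.mk rel).getD "subject" "")))) (fun p => p.1) (fun p => p.2)
    let st := pairs.foldl pvStepB ((none : Option String), (0 : Int), ["```mermaid", "graph LR"])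
    PySem.Str.join "\n" (st.2.2 ++ ["```"])

-- ===== PRECONDITION & SPEC =====
def Spec_generate_mermaid_blood_supply (structures : List (String × List (String × String))) (relationships : List (String × List (List (String × String)))) (out : String) : Prop := out = generate_mermaid_blood_supply_alt structures relationships
instance (structures : List (String × List (String × String))) (relationships : List (String × List (List (String × String)))) (out : String) : Decidable (Spec_generate_mermaid_blood_supply structures relationships out) := by unfold Spec_generate_mermaid_blood_supply; infer_instance

-- ===== CLAIM (what is proved, stated in full; the proofs are below) =====
def Claim_equal_generate_mermaid_blood_supply : Prop := ∀ (structures : List (String × List (String × String))) (relationships : List (String × List (List (String × String)))), Dom_generate_mermaid_blood_supply structures relationships → Spec_generate_mermaid_blood_supply structures relationships (generate_mermaid_blood_supply structures relationships)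

-- ===== LEMMAS AND PROOFS =====

lemma find?_map_keyed (ks : List String) (G : String → List String) (a : String) :
    List.find? (fun p => p.1 == a) (ks.map (fun k => (k, G k))) = if a ∈ ks then some (a, G a) else none := by
  induction ks with
  | nil => simp
  | cons k ks ih =>
    simp only [List.map_cons, List.find?_cons]
    by_cases h : k = a
    · subst h; simp
    · rw [show (k == a) = false by simp [h]]
      simp [ih, List.mem_cons, Ne.symm h]
lemma getD_keyed (ks : List String) (G : String → List String) (a : String) :
    (PySem.Dict.mk (ks.map (fun k => (k, G k)))).getD a [] = if a ∈ ks then G a else [] := by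
  simp only [PySem.Dict.getD, PySem.Dict.get?, PySem.Dict.items, find?_map_keyed]
  split <;> simp
lemma contains_keyed (ks : List String) (G : String → List String) (a : String) :
    (PySem.Dict.mk (ks.map (fun k => (k, G k)))).contains a = decide (a ∈ ks) := by
  by_cases h : a ∈ ks
  · simp only [PySem.Dict.contains, PySem.Dict.items, List.any_map, h, decide_true]
    simp only [List.any_eq_true]
    exact ⟨a, h, by simp⟩
  · simp only [PySem.Dict.contains, PySem.Dict.items, List.any_map, h, decide_false]
    simp only [List.any_eq_false]
    intro x hx
    simp only [Function.comp]
    simp only [beq_iff_eq]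
    intro e; exact h (by rwa [e] at hx)
lemma ofList_append_singleton {α : Type} [BEq α] [LawfulBEq α] (xs : List α) (x : α) :
    PySem.Set.ofList (xs ++ [x]) = if x ∈ xs then PySem.Set.ofList xs else PySem.Set.ofList xs ++ [x] := by
  conv_lhs => simp only [PySem.Set.ofList, List.foldl_append, List.foldl_cons, List.foldl_nil]
  show PySem.Set.add (PySem.Set.ofList xs) x = _
  by_cases h : x ∈ xs
  · have hc : (PySem.Set.ofList xs).contains x = true := by
      rw [PySem.Set.contains, List.contains_eq_mem]; exact decide_eq_true ((PySem.Set.mem_ofList xs x).2 h)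
    rw [if_pos h]
    simp [PySem.Set.add, h]
  · have hc : (PySem.Set.ofList xs).contains x = false := by
      rw [PySem.Set.contains, List.contains_eq_mem]
      exact decide_eq_false (fun hm => h ((PySem.Set.mem_ofList xs x).1 hm))
    rw [if_neg h]
    simp [PySem.Set.add, h]

def pvG (pairs : List (String × String)) (a : String) : List String := (pairs.filter (fun p => p.1 == a)).map (fun p => p.2)
def pvKs (pairs : List (String × String)) : List String := PySem.List.dedup (pairs.map (fun p => p.1))
def pvArts (pairs : List (String × String)) : List String := PySem.List.sorted (pvKs pairs) (fun x => x)
def pvGroupD (pairs : List (String × String)) : PySem.Dict String (List String) :=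
  pairs.foldl (fun d p => d.modify p.1 [] (fun l => l ++ [p.2])) (PySem.Dict.mk [])

lemma pvG_append (l : List (String × String)) (p : String × String) (a : String) :
    pvG (l ++ [p]) a = pvG l a ++ (if p.1 == a then [p.2] else []) := by
  simp only [pvG, List.filter_append, List.map_append]
  congr 1
  by_cases h : p.1 = a <;> simp [List.filter_cons, h]

lemma not_mem_filter_nil (l : List (String × String)) (a : String) (h : a ∉ l.map (fun p => p.1)) :
    l.filter (fun p => p.1 == a) = [] := by
  rw [List.filter_eq_nil_iff]
  intro p hp
  simp only [beq_iff_eq]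
  exact fun e => h (List.mem_map.mpr ⟨p, hp, e⟩)

lemma pvGroupD_items (pairs : List (String × String)) :
    (pvGroupD pairs).items = (pvKs pairs).map (fun a => (a, pvG pairs a)) := by
  induction pairs using List.reverseRecOn with
  | nil => simp [pvGroupD, pvKs, PySem.List.dedup_eq_ofList, PySem.Set.ofList, pvG, PySem.Set.empty]
  | append_singleton l p ih =>
    have hstep : pvGroupD (l ++ [p]) = (pvGroupD l).modify p.1 [] (fun s => s ++ [p.2]) := by
      simp [pvGroupD, List.foldl_append]
    have hdict : pvGroupD l = PySem.Dict.mk ((pvKs l).map (fun a => (a, pvG l a))) := by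
      apply PySem.Dict.ext; exact ih
    rw [hstep, hdict, PySem.Dict.modify, getD_keyed]
    by_cases hm : p.1 ∈ pvKs l
    · have hmem : p.1 ∈ l.map (fun q => q.1) := by
        simpa [pvKs, PySem.List.dedup_eq_ofList, PySem.Set.mem_ofList] using hm
      have hk : pvKs (l ++ [p]) = pvKs l := by
        simp [pvKs, List.map_append, PySem.List.dedup_eq_ofList, ofList_append_singleton, hmem]
      rw [if_pos hm, hk]
      rw [PySem.Dict.insert, if_pos (by rw [contains_keyed]; exact decide_eq_true hm)]
      simp only [PySem.Dict.items, List.map_map]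
      apply List.map_congr_left
      intro k hkmem
      by_cases hka : k = p.1
      · subst hka
        simp [pvG_append, Function.comp]
      · have : (k == p.1) = false := by simp [hka]
        simp [Function.comp, this, pvG_append, Ne.symm hka]
    · have hmem : p.1 ∉ l.map (fun q => q.1) := by
        intro hc
        exact hm (by simpa [pvKs, PySem.List.dedup_eq_ofList, PySem.Set.mem_ofList] using hc)
      have hk : pvKs (l ++ [p]) = pvKs l ++ [p.1] := by
        simp [pvKs, List.map_append, PySem.List.dedup_eq_ofList, ofList_append_singleton, hmem]
      rw [if_neg hm, hk]
      rw [PySem.Dict.insert, if_neg (by rw [contains_keyed]; simp [hm])]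
      simp only [PySem.Dict.items, List.map_append, List.map_cons, List.map_nil]
      congr 1
      · apply List.map_congr_left
        intro k hkmem
        have hka : k ≠ p.1 := fun e => hm (e ▸ hkmem)
        have : (p.1 == k) = false := by simp [Ne.symm hka]
        simp [pvG_append, this]
      · have hnil : pvG l p.1 = [] := by
          simp [pvG, not_mem_filter_nil l p.1 hmem]
        simp [pvG_append, hnil]

lemma pvArts_pairwise (pairs : List (String × String)) : (pvArts pairs).Pairwise (· < ·) := by
  simp only [pvArts, pvKs, PySem.List.dedup_eq_ofList]
  exact PySem.List.sorted_ofList_pairwise_lt _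

lemma sorted_items_eq (pairs : List (String × String)) :
    PySem.List.sorted ((pvKs pairs).map (fun a => (a, pvG pairs a))) (fun kv => kv.1)
      = (pvArts pairs).map (fun a => (a, pvG pairs a)) := by
  apply PySem.List.sorted_eq_of_perm_of_pairwise_lt
  · exact (PySem.List.sorted_perm (pvKs pairs) (fun x => x) false).map _
  · rw [List.pairwise_map]
    exact pvArts_pairwise pairs

lemma slice6 (xs : List String) : PySem.List.slice xs none (some 6) = xs.take 6 := by
  simpa using PySem.List.slice_to xs (by norm_num : (0:Int) ≤ 6)

lemma sorted2_eq_sorted_lex (xs : List (String × String)) :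
    PySem.List.sorted2 xs (fun p => p.1) (fun p => p.2)
      = PySem.List.sorted xs (fun p => toLex (p.1, p.2)) := by
  show List.foldl _ [] xs = List.foldl _ [] xs
  congr 1
  funext acc x
  congr 1
  funext a b
  show (decide (a.1 < b.1) || !decide (b.1 < a.1) && decide (a.2 < b.2))
      = decide ((toLex (a.1, a.2) : Lex (String × String)) < toLex (b.1, b.2))
  rcases lt_trichotomy a.1 b.1 with h | h | h
  · simp [h, Prod.Lex.lt_iff]
  · simp [h, lt_irrefl, Prod.Lex.lt_iff]
  · have h2 : ¬ a.1 = b.1 := ne_of_gt h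
    simp [not_lt_of_gt h, lt_asymm h, Prod.Lex.lt_iff, h2]
    intro hle
    exfalso
    have hab : a.1 ≤ b.1 := by simpa using hle
    exact absurd h (not_lt_of_ge hab)

lemma pvG_map_fst (pairs : List (String × String)) (a : String) :
    (pvG pairs a).map (fun s => (a, s)) = pairs.filter (fun p => p.1 == a) := by
  simp only [pvG, List.map_map]
  conv_rhs => rw [← List.map_id (pairs.filter (fun p => p.1 == a))]
  apply List.map_congr_left
  intro p hp
  have := List.of_mem_filter hp
  simp only [beq_iff_eq] at this
  simp only [Function.comp, id]
  exact Prod.ext this.symm rfl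

def pvSG (pairs : List (String × String)) (a : String) : List String := PySem.List.sorted (pvG pairs a) (fun x => x)

lemma partition_perm (ks : List String) (l : List (String × String))
    (hcov : ∀ p ∈ l, p.1 ∈ ks) (hnd : ks.Nodup) :
    (ks.flatMap (fun a => l.filter (fun p => p.1 == a))).Perm l := by
  induction ks generalizing l with
  | nil =>
    have hl : l = [] := by
      cases l with
      | nil => rfl
      | cons p t => exact absurd (hcov p (List.mem_cons_self)) (List.not_mem_nil)
    simp [hl]
  | cons k ks ih =>
    rw [List.flatMap_cons]
    have hknotin : k ∉ ks := (List.nodup_cons.mp hnd).1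
    have hflat : ks.flatMap (fun a => l.filter (fun p => p.1 == a))
        = ks.flatMap (fun a => (l.filter (fun p => !(p.1 == k))).filter (fun p => p.1 == a)) := by
      apply List.flatMap_congr
      intro a ha
      rw [List.filter_filter]
      apply List.filter_congr
      intro p _
      have hak : (a == k) = false := by
        simp only [beq_eq_false_iff_ne]
        exact fun e => hknotin (e ▸ ha)
      by_cases hp : p.1 = a
      · simp [hp, hak]
      · simp [hp]
    rw [hflat]
    have ihl := ih (l.filter (fun p => !(p.1 == k)))
      (by
        intro p hp
        have hpl : p ∈ l := List.mem_of_mem_filter hp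
        have hpk : (p.1 == k) = false := by
          have := List.of_mem_filter hp
          simpa using this
        rcases List.mem_cons.mp (hcov p hpl) with h | h
        · exact absurd h (by simpa using hpk)
        · exact h)
      (List.nodup_cons.mp hnd).2
    exact (ihl.append_left _).trans (List.filter_append_perm _ l)

lemma flatMap_perm_of_perm {α β : Type} (as : List α) (f g : α → List β)
    (h : ∀ a ∈ as, (f a).Perm (g a)) : (as.flatMap f).Perm (as.flatMap g) := by
  induction as with
  | nil => simp
  | cons a as ih =>
    rw [List.flatMap_cons, List.flatMap_cons]
    exact (h a (List.mem_cons_self)).append (ih (fun b hb => h b (List.mem_cons_of_mem a hb)))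

lemma flat_pairwise_le (pairs : List (String × String)) :
    ∀ (as : List String), as.Pairwise (· < ·) →
    (as.flatMap (fun a => (pvSG pairs a).map (fun s => (a, s)))).Pairwise
      (fun p q => (toLex (p.1, p.2) : Lex (String × String)) ≤ toLex (q.1, q.2)) := by
  intro as h
  induction as with
  | nil => simp
  | cons a as ih =>
    rw [List.flatMap_cons, List.pairwise_append]
    rcases List.pairwise_cons.mp h with ⟨hrest, htail⟩
    refine ⟨?_, ih htail, ?_⟩
    · rw [List.pairwise_map]
      have hs := PySem.List.sorted_pairwise (pvG pairs a) (fun x => x)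
      refine hs.imp ?_
      intro x y hxy
      exact Prod.Lex.le_iff.mpr (Or.inr ⟨rfl, hxy⟩)
    · intro x hx y hy
      rcases List.mem_map.mp hx with ⟨s, _, rfl⟩
      rcases List.mem_flatMap.mp hy with ⟨b, hb, hyb⟩
      rcases List.mem_map.mp hyb with ⟨t, _, rfl⟩
      exact le_of_lt (Prod.Lex.lt_iff.mpr (Or.inl (hrest b hb)))

lemma sorted_pairs_eq (pairs : List (String × String)) :
    PySem.List.sorted pairs (fun p => toLex (p.1, p.2))
      = (pvArts pairs).flatMap (fun a => (pvSG pairs a).map (fun s => (a, s))) := by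
  apply PySem.List.eq_of_perm_of_pairwise_le_of_injective (fun p => (toLex (p.1, p.2) : Lex (String × String)))
  · intro p q hpq
    have := congrArg ofLex hpq
    simpa [Prod.ext_iff] using this
  · -- perm
    refine (PySem.List.sorted_perm pairs _ false).trans ?_
    have h1 : ((pvArts pairs).flatMap (fun a => (pvSG pairs a).map (fun s => (a, s)))).Perm
        ((pvArts pairs).flatMap (fun a => (pvG pairs a).map (fun s => (a, s)))) := by
      apply flatMap_perm_of_perm
      intro a _
      exact (PySem.List.sorted_perm (pvG pairs a) (fun x => x) false).map _
    have h2 : (pvArts pairs).flatMap (fun a => (pvG pairs a).map (fun s => (a, s)))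
        = (pvArts pairs).flatMap (fun a => pairs.filter (fun p => p.1 == a)) := by
      apply List.flatMap_congr
      intro a _
      exact pvG_map_fst pairs a
    have h3 : ((pvArts pairs).flatMap (fun a => pairs.filter (fun p => p.1 == a))).Perm pairs := by
      apply partition_perm
      · intro p hp
        simp only [pvArts, pvKs, PySem.List.mem_sorted, PySem.List.dedup_eq_ofList, PySem.Set.mem_ofList]
        exact List.mem_map.mpr ⟨p, hp, rfl⟩
      · exact (pvArts_pairwise pairs).imp (fun {a b} h => ne_of_lt h)
    exact ((h1.trans (h2 ▸ List.Perm.refl _)).trans h3).symm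
  · exact PySem.List.sorted_pairwise pairs _
  · exact flat_pairwise_le pairs (pvArts pairs) (pvArts_pairwise pairs)

def pvRid (s : String) : String := PySem.Str.replace (PySem.Str.replace s " " "_") "-" "_"
def pvNode (a : String) : String := "    " ++ pvRid a ++ "([" ++ a ++ "])"
def pvEdge (a s : String) : String := "    " ++ pvRid a ++ " -.->|supplies| " ++ pvRid s ++ "[" ++ s ++ "]"

lemma scan_run (a : String) (ss : List String) (cnt : Int) (acc : List String) :
    (ss.map (fun s => (a, s))).foldl pvStepB (some a, cnt, acc)
      = (some a, cnt + ((min ss.length ((6 - cnt).toNat) : Nat) : Int),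
         acc ++ (ss.take ((6 - cnt).toNat)).map (pvEdge a)) := by
  induction ss generalizing cnt acc with
  | nil => simp
  | cons s t ih =>
    simp only [List.map_cons, List.foldl_cons]
    have hstep : pvStepB (some a, cnt, acc) (a, s)
        = if cnt < 6 then (some a, cnt + 1, acc ++ [pvEdge a s]) else (some a, cnt, acc) := by
      simp [pvStepB, pvEdge, pvRid]
    rw [hstep]
    by_cases h : cnt < 6
    · rw [if_pos h, ih]
      rcases Nat.exists_eq_add_of_lt (show 0 < (6 - cnt).toNat by omega) with ⟨n, hn⟩
      have h1 : (6 - (cnt + 1)).toNat = n := by omega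
      have h2 : (6 - cnt).toNat = n + 1 := by omega
      rw [h1, h2]
      simp only [Prod.mk.injEq]
      refine ⟨trivial, ?_, ?_⟩
      · push_cast [List.length_cons]; omega
      · simp [List.take_succ_cons]
    · rw [if_neg h, ih]
      have h1 : (6 - cnt).toNat = 0 := by omega
      simp [h1]

lemma scan_group (a : String) (s0 : String) (t : List String) (cur : Option String) (cnt : Int) (acc : List String)
    (h : some a ≠ cur) :
    (((s0 :: t).map (fun s => (a, s))).foldl pvStepB (cur, cnt, acc)
      = (some a, 1 + ((min t.length 5 : Nat) : Int),
         acc ++ pvNode a :: ((s0 :: t).take 6).map (pvEdge a))) := by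
  simp only [List.map_cons, List.foldl_cons]
  have hstep : pvStepB (cur, cnt, acc) (a, s0)
      = (some a, 1, (acc ++ [pvNode a]) ++ [pvEdge a s0]) := by
    simp [pvStepB, pvNode, pvEdge, pvRid, h]
  rw [hstep, scan_run]
  have h5 : ((6 : Int) - 1).toNat = 5 := by decide
  rw [h5]
  simp only [Prod.mk.injEq]
  refine ⟨trivial, trivial, ?_⟩
  simp [List.take_succ_cons]

lemma scan_groups (as : List String) (f : String → List String) (cur : Option String) (cnt : Int) (acc : List String)
    (hpw : as.Pairwise (· < ·)) (hcur : ∀ b ∈ as, some b ≠ cur) (hne : ∀ b ∈ as, f b ≠ []) :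
    ((as.flatMap (fun a => (f a).map (fun s => (a, s)))).foldl pvStepB (cur, cnt, acc)).2.2
      = acc ++ as.flatMap (fun a => pvNode a :: ((f a).take 6).map (pvEdge a)) := by
  induction as generalizing cur cnt acc with
  | nil => simp
  | cons a as ih =>
    rw [List.flatMap_cons, List.flatMap_cons, List.foldl_append]
    rcases List.pairwise_cons.mp hpw with ⟨hrest, htail⟩
    rcases hfa : f a with _ | ⟨s0, t⟩
    · exact absurd hfa (hne a (List.mem_cons_self))
    · rw [scan_group a s0 t cur cnt acc (hcur a (List.mem_cons_self))]
      rw [ih (some a) _ _ htail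
        (fun b hb => by simpa using (ne_of_gt (hrest b hb)))
        (fun b hb => hne b (List.mem_cons_of_mem a hb))]
      simp
def pvBS (relationships : List (String × List (List (String × String)))) : List (List (String × String)) := (PySem.Dict.mk relationships).getD "supplied_by" []
def pvPairs (structures : List (String × List (String × String))) (relationships : List (String × List (List (String × String)))) : List (String × String) :=
  (pvBS relationships).map (fun rel =>
    (get_structure_name structures ((PySem.Dict.mk rel).getD "object" ""),
     get_structure_name structures ((PySem.Dict.mk rel).getD "subject" "")))
def pvLines (pairs : List (String × String)) : List String :=
  (pvArts pairs).flatMap (fun a => pvNode a :: ((pvSG pairs a).take 6).map (pvEdge a))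

lemma A_norm (structures : List (String × List (String × String))) (relationships : List (String × List (List (String × String)))) :
    generate_mermaid_blood_supply structures relationships
      = if pvBS relationships = [] then ""
        else PySem.Str.join "\n" ((["```mermaid", "graph LR"] ++ pvLines (pvPairs structures relationships)) ++ ["```"]) := by
  rw [generate_mermaid_blood_supply]
  by_cases hbs : (PySem.Dict.mk relationships).getD "supplied_by" ([] : List (List (String × String))) = []
  · simp only [pvBS, hbs, if_true]
  · rw [if_neg hbs, if_neg (show ¬ (pvBS relationships = []) from hbs)]
    have hgroup : ((PySem.Dict.mk relationships).getD "supplied_by" ([] : List (List (String × String)))).foldl (fun d rel =>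
        d.modify (get_structure_name structures ((PySem.Dict.mk rel).getD "object" "")) []
          (fun l => l ++ [get_structure_name structures ((PySem.Dict.mk rel).getD "subject" "")]))
        (PySem.Dict.mk []) = pvGroupD (pvPairs structures relationships) := by
      rw [pvGroupD, pvPairs, pvBS, List.foldl_map]
    rw [hgroup]
    simp only [pvGroupD_items, sorted_items_eq, List.foldl_map]
    congr 1
    rw [pvLines]
    have hinner : ∀ (a : String) (lines : List String),
        (PySem.List.slice (PySem.List.sorted (pvG (pvPairs structures relationships) a) (fun x => x)) none (some 6)).foldl
          (fun lines structure_ =>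
            lines ++ ["    " ++ PySem.Str.replace (PySem.Str.replace a " " "_") "-" "_" ++ " -.->|supplies| "
              ++ PySem.Str.replace (PySem.Str.replace structure_ " " "_") "-" "_" ++ "[" ++ structure_ ++ "]"]) lines
        = lines ++ ((pvSG (pvPairs structures relationships) a).take 6).map (pvEdge a) := by
      intro a lines
      rw [slice6, pvSG]
      rw [PySem.List.foldl_append_singleton_eq_map (fun structure_ =>
        "    " ++ PySem.Str.replace (PySem.Str.replace a " " "_") "-" "_" ++ " -.->|supplies| "
          ++ PySem.Str.replace (PySem.Str.replace structure_ " " "_") "-" "_" ++ "[" ++ structure_ ++ "]")]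
      rfl
    have houter : (fun (lines : List String) (a : String) =>
        (PySem.List.slice (PySem.List.sorted (pvG (pvPairs structures relationships) a) (fun x => x)) none (some 6)).foldl
          (fun lines structure_ =>
            lines ++ ["    " ++ PySem.Str.replace (PySem.Str.replace a " " "_") "-" "_" ++ " -.->|supplies| "
              ++ PySem.Str.replace (PySem.Str.replace structure_ " " "_") "-" "_" ++ "[" ++ structure_ ++ "]"])
          (lines ++ ["    " ++ PySem.Str.replace (PySem.Str.replace a " " "_") "-" "_" ++ "([" ++ a ++ "])"]))
        = fun (lines : List String) (a : String) =>
          lines ++ (pvNode a :: ((pvSG (pvPairs structures relationships) a).take 6).map (pvEdge a)) := by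
      funext lines a
      rw [hinner a]
      simp [pvNode, pvRid]
    rw [houter, PySem.List.foldl_append_eq_flatMap]

lemma pvSG_ne_nil (pairs : List (String × String)) (b : String) (hb : b ∈ pvArts pairs) :
    pvSG pairs b ≠ [] := by
  rw [pvSG, Ne, PySem.List.sorted_eq_nil_iff]
  have hbk : b ∈ pairs.map (fun p => p.1) := by
    simpa [pvArts, pvKs, PySem.List.mem_sorted, PySem.List.dedup_eq_ofList, PySem.Set.mem_ofList] using hb
  rcases List.mem_map.mp hbk with ⟨p, hp, rfl⟩
  intro hnil
  have hmem : p ∈ pairs.filter (fun q => q.1 == p.1) := List.mem_filter.mpr ⟨hp, by simp⟩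
  rw [pvG, List.map_eq_nil_iff] at hnil
  exact absurd (hnil ▸ hmem) (List.not_mem_nil)

lemma B_norm (structures : List (String × List (String × String))) (relationships : List (String × List (List (String × String)))) :
    generate_mermaid_blood_supply_alt structures relationships
      = if pvBS relationships = [] then ""
        else PySem.Str.join "\n" ((["```mermaid", "graph LR"] ++ pvLines (pvPairs structures relationships)) ++ ["```"]) := by
  rw [generate_mermaid_blood_supply_alt]
  by_cases hbs : (PySem.Dict.mk relationships).getD "supplied_by" ([] : List (List (String × String))) = []
  · simp only [pvBS, hbs, if_true]
  · rw [if_neg hbs, if_neg (show ¬ (pvBS relationships = []) from hbs)]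
    have hp : ((PySem.Dict.mk relationships).getD "supplied_by" ([] : List (List (String × String)))).map (fun rel =>
        (resolve_name structures ((PySem.Dict.mk rel).getD "object" ""),
         resolve_name structures ((PySem.Dict.mk rel).getD "subject" "")))
        = pvPairs structures relationships := rfl
    rw [hp, sorted2_eq_sorted_lex, sorted_pairs_eq]
    simp only [scan_groups (pvArts (pvPairs structures relationships)) (pvSG (pvPairs structures relationships))
      none 0 ["```mermaid", "graph LR"] (pvArts_pairwise _)
      (fun b _ => by simp) (fun b hb => pvSG_ne_nil _ b hb)]
    rw [pvLines]

-- ===== VERDICT (by name: the statement is the Claim_ definition above) =====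
theorem generate_mermaid_blood_supply_spec : Claim_equal_generate_mermaid_blood_supply := by
  intro structures relationships _
  unfold Spec_generate_mermaid_blood_supply
  rw [A_norm, B_norm]
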